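-- pv_equiv track=rewrite | github.com/miliar/Code_Jam_Webscraper | solutions_python/Problem_129/108.py | solve
-- ===== SOURCE A (Python) =====
-- MOD = 1000002013
--
-- def trip_cost(n, o, e):
--     return sum(range(n, n - (e - o), -1))
--
-- def solve(n, arr):
--     true_cost = 0
--     false_cost = 0
--     entrants = [0] * n
--     exits = [0] * n
--     for (o, e, p) in arr:
--         entrants[o - 1] += p
--         exits[e - 1] += p
--         true_cost += p * trip_cost(n, o, e)
--     tickets = [0] * n
--     for i in range(n):
--         tickets[i] = entrants[i]
--         leaving = exits[i]
--         for swapnr in range(i, -1, -1):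
--             leaving_with = min(tickets[swapnr], leaving)
--             false_cost += leaving_with * trip_cost(n, swapnr, i)
--             tickets[swapnr] -= leaving_with
--             leaving -= leaving_with
--             if leaving == 0:
--                 break
--     return (true_cost - false_cost) % MOD
-- ===== SOURCE B (Python) =====
-- MOD = 1000002013
--
-- def trip_cost_cf(n, d):
--     # closed form for sum(range(n, n - d, -1)); empty for d <= 0
--     return d * (2 * n - d + 1) // 2 if d > 0 else 0
--
-- def solve(n, arr):
--     true_cost = sum(p * trip_cost_cf(n, e - o) for (o, e, p) in arr)
--     entrants = [0] * n
--     exits = [0] * n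
--     for (o, e, p) in arr:
--         entrants[o - 1] += p
--         exits[e - 1] += p
--     false_cost = 0
--     stack = []  # (boarding station, unmatched tickets), most recent boarding on top
--     for i in range(n):
--         c = entrants[i]
--         if c != 0:
--             stack.append((i, c))
--         leaving = exits[i]
--         while leaving != 0 and stack:
--             s, t = stack.pop()
--             w = min(t, leaving)
--             false_cost += w * trip_cost_cf(n, i - s)
--             if w < t:
--                 stack.append((s, t - w))
--             leaving -= w
--     return (true_cost - false_cost) % MOD
-- ===== Notes on version B (the rewrite author's own statement) =====
-- stated objective: faster
-- what changed: trip costs use the closed-form arithmetic-series formula instead of summing a range; the true cost is a single sum over the trips (no accumulator pass interleaved with counter updates); and A's per-station backward rescan of a tickets array is replaced by a LIFO stack of (station, remaining tickets) pairs whose entries are pushed and popped at most once each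
-- outside the precondition, e.g. on solve(2, [(1, 2, -1)]): A returns 1000002011, B returns 0
import Mathlib
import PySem

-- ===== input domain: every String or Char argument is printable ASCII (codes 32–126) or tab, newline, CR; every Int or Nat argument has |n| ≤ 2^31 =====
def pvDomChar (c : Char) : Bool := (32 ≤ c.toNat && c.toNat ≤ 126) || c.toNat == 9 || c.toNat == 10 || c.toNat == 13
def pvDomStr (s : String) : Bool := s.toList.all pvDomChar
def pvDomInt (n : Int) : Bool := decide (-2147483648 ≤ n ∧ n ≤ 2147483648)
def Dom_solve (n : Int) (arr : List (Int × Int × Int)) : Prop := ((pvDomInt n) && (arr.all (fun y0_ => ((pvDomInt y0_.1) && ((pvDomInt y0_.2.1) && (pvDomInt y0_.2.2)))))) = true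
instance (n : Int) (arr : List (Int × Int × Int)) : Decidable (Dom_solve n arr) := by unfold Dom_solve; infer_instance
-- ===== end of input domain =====

-- B replaces A's range-summed trip costs by the closed-form arithmetic series, computes the
-- true cost as one sum over the trips, and replaces A's per-station backward rescan of the
-- tickets array by a LIFO stack of (station, remaining tickets) pairs; objective: faster.

-- ===== PORT A =====

def trip_cost (n o e : Int) : Int :=
  (PySem.List.pyRange n (n - (e - o)) (-1)).foldl (· + ·) 0

-- entrants[i] += p  (shared by both ports: B's Python does the same update)
def bump (xs : List Int) (i v : Int) : List Int :=
  PySem.List.pySetD xs i (PySem.List.pyGetD xs i 0 + v)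

def pass1A (n : Int) : List (Int × Int × Int) → List Int → List Int → Int → List Int × List Int × Int
  | [], ent, ex, tc => (ent, ex, tc)
  | (o, e, p) :: rest, ent, ex, tc =>
      pass1A n rest (bump ent (o - 1) p) (bump ex (e - 1) p) (tc + p * trip_cost n o e)

-- the inner 'for swapnr in range(i, -1, -1)' loop with its break
def innerA (n i : Int) : List Int → List Int → Int → Int → List Int × Int
  | [], tickets, _, fc => (tickets, fc)
  | s :: rest, tickets, leaving, fc =>
      let t := PySem.List.pyGetD tickets s 0
      let w := min t leaving
      let fc' := fc + w * trip_cost n s i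
      let tickets' := PySem.List.pySetD tickets s (t - w)
      let leaving' := leaving - w
      if leaving' = 0 then (tickets', fc') else innerA n i rest tickets' leaving' fc'

def outerA (n : Int) (ent ex : List Int) : List Int → List Int → Int → List Int × Int
  | [], tickets, fc => (tickets, fc)
  | i :: rest, tickets, fc =>
      let tickets' := PySem.List.pySetD tickets i (PySem.List.pyGetD ent i 0)
      let r := innerA n i (PySem.List.pyRange i (-1) (-1)) tickets' (PySem.List.pyGetD ex i 0) fc
      outerA n ent ex rest r.1 r.2

def solve (n : Int) (arr : List (Int × Int × Int)) : Int :=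
  let r1 := pass1A n arr (List.replicate n.toNat 0) (List.replicate n.toNat 0) 0
  let r2 := outerA n r1.1 r1.2.1 (PySem.List.pyRange 0 n 1) (List.replicate n.toNat 0) 0
  PySem.Int.mod (r1.2.2 - r2.2) 1000002013

-- ===== PORT B =====

def trip_cost_cf (n d : Int) : Int :=
  if 0 < d then PySem.Int.floordiv (d * (2 * n - d + 1)) 2 else 0

-- the single 'for (o, e, p) in arr' loop updating both counter arrays at once
def addBoth (st : List Int × List Int) (t : Int × Int × Int) : List Int × List Int :=
  (bump st.1 (t.1 - 1) t.2.2, bump st.2 (t.2.1 - 1) t.2.2)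

-- the 'while leaving != 0 and stack' pop loop; an empty stack ends the loop.
-- In the w < t branch w = min t leaving < t forces w = leaving, so the next while test
-- leaving - w = 0 fails and the loop exits with the remainder pushed back.
def innerB (n i : Int) : List (Int × Int) → Int → Int → List (Int × Int) × Int
  | [], _, fc => ([], fc)
  | (s, t) :: rest, leaving, fc =>
      if leaving = 0 then ((s, t) :: rest, fc)
      else
        let w := min t leaving
        let fc' := fc + w * trip_cost_cf n (i - s)
        if w < t then ((s, t - w) :: rest, fc')
        else innerB n i rest (leaving - w) fc'

def outerB (n : Int) (ent ex : List Int) : List Int → List (Int × Int) → Int → List (Int × Int) × Int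
  | [], st, fc => (st, fc)
  | i :: rest, st, fc =>
      let c := PySem.List.pyGetD ent i 0
      let st' := if c ≠ 0 then (i, c) :: st else st
      let r := innerB n i st' (PySem.List.pyGetD ex i 0) fc
      outerB n ent ex rest r.1 r.2

def solve_alt (n : Int) (arr : List (Int × Int × Int)) : Int :=
  let true_cost := (arr.map (fun t => t.2.2 * trip_cost_cf n (t.2.1 - t.1))).sum
  let acc := arr.foldl addBoth (List.replicate n.toNat 0, List.replicate n.toNat 0)
  let r := outerB n acc.1 acc.2 (PySem.List.pyRange 0 n 1) [] 0
  PySem.Int.mod (true_cost - r.2) 1000002013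

-- ===== PRECONDITION & SPEC =====
-- Pre_solve excludes exactly the inputs where A raises IndexError (a station index
-- outside Python's wraparound range [-n, n)) and trips with a negative passenger count p,
-- on which A's greedy scan returns accidental values (min against negative ticket counts)
-- that B does not reproduce.
def Pre_solve (n : Int) (arr : List (Int × Int × Int)) : Prop :=
  ∀ t ∈ arr, 0 ≤ t.2.2 ∧ -n ≤ t.1 - 1 ∧ t.1 - 1 < n ∧ -n ≤ t.2.1 - 1 ∧ t.2.1 - 1 < n
instance (n : Int) (arr : List (Int × Int × Int)) : Decidable (Pre_solve n arr) := by
  unfold Pre_solve; infer_instance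

def pvWitness_solve : Int × (List (Int × Int × Int)) := (3, [(1, 3, 2), (2, 3, 1)])

def Spec_solve (n : Int) (arr : List (Int × Int × Int)) (out : Int) : Prop := out = solve_alt n arr
instance (n : Int) (arr : List (Int × Int × Int)) (out : Int) : Decidable (Spec_solve n arr out) := by unfold Spec_solve; infer_instance

-- ===== CLAIM (what is proved, stated in full; the proofs are below) =====
def Claim_equal_solve : Prop := ∀ (n : Int) (arr : List (Int × Int × Int)), Dom_solve n arr → Pre_solve n arr → Spec_solve n arr (solve n arr)

-- ===== LEMMAS AND PROOFS =====

-- value of a station in the stack (0 if absent)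
def lookupS : List (Int × Int) → Int → Int
  | [], _ => 0
  | (s, t) :: r, j => if s = j then t else lookupS r j

-- stack well-formed: stations in [0, b], strictly decreasing, positive counts
def StackOK : List (Int × Int) → Int → Prop
  | [], _ => True
  | (s, t) :: r, b => 0 ≤ s ∧ s ≤ b ∧ 0 < t ∧ StackOK r (s - 1)

-- the tickets array and the stack hold the same multiset of unmatched tickets
def Corr (tickets : List Int) (st : List (Int × Int)) : Prop :=
  ∀ j : Nat, j < tickets.length → tickets.getD j 0 = lookupS st (j : Int)

theorem stackOK_mono (st : List (Int × Int)) (b b' : Int) (h : StackOK st b) (hb : b ≤ b') :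
    StackOK st b' := by
  cases st with
  | nil => trivial
  | cons p r =>
      obtain ⟨h1, h2, h3, h4⟩ := h
      exact ⟨h1, le_trans h2 hb, h3, h4⟩

theorem lookupS_eq_zero (st : List (Int × Int)) (b j : Int) (h : StackOK st b) (hj : b < j) :
    lookupS st j = 0 := by
  induction st generalizing b with
  | nil => rfl
  | cons p r ih =>
      obtain ⟨h1, h2, h3, h4⟩ := h
      have : p.1 ≠ j := by omega
      simp only [lookupS, this, if_false]
      exact ih (p.1 - 1) h4 (by omega)

theorem stackOK_nil (st : List (Int × Int)) (b : Int) (h : StackOK st b) (hb : b < 0) :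
    st = [] := by
  cases st with
  | nil => rfl
  | cons p r => obtain ⟨h1, h2, _, _⟩ := h; omega

theorem set_getD_self (xs : List Int) (j : Nat) (hj : j < xs.length) :
    xs.set j (xs.getD j 0) = xs := by
  apply List.ext_getElem
  · simp
  · intro k hk hk'
    simp only [List.getElem_set]
    split
    · subst k; rw [List.getD_eq_getElem xs 0 hj]
    · rfl

theorem trip_sum (m : Nat) : ∀ (a c : Int),
    ((PySem.List.pyRange a (a - m) (-1)).foldl (· + ·) c) * 2 = c * 2 + m * (2 * a - m + 1) := by
  induction m with
  | zero =>
      intro a c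
      rw [PySem.List.pyRange_neg_one_eq_nil (by omega)]
      simp
  | succ m ih =>
      intro a c
      rw [PySem.List.pyRange_neg_one_cons (by push_cast; omega)]
      have harg : a - ((m : Int) + 1) = (a - 1) - (m : Int) := by ring
      simp only [List.foldl_cons]
      push_cast
      rw [harg, ih (a - 1) (c + a)]
      ring

theorem trip_eq (n o e : Int) : trip_cost n o e = trip_cost_cf n (e - o) := by
  unfold trip_cost trip_cost_cf
  set d := e - o with hd
  by_cases hd0 : 0 < d
  · rw [if_pos hd0]
    obtain ⟨m, hm⟩ : ∃ m : Nat, d = (m : Int) := ⟨d.toNat, by omega⟩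
    have hs := trip_sum m n 0
    rw [PySem.Int.floordiv_eq_ediv_of_pos (by norm_num)]
    rw [hm] at *
    have h2 : (m : Int) * (2 * n - m + 1)
        = ((PySem.List.pyRange n (n - m) (-1)).foldl (· + ·) 0) * 2 := by
      omega
    rw [h2]
    omega
  · rw [if_neg hd0, PySem.List.pyRange_neg_one_eq_nil (by omega)]
    rfl

-- A's fused first pass splits into B's trip-cost sum and B's pair-fold over the counters
theorem pass1A_split (n : Int) : ∀ (arr : List (Int × Int × Int)) (ent ex : List Int) (tc : Int),
    pass1A n arr ent ex tc
      = ((arr.foldl addBoth (ent, ex)).1, (arr.foldl addBoth (ent, ex)).2,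
         tc + (arr.map (fun t => t.2.2 * trip_cost_cf n (t.2.1 - t.1))).sum) := by
  intro arr
  induction arr with
  | nil => intro ent ex tc; simp [pass1A]
  | cons hd rest ih =>
      intro ent ex tc
      obtain ⟨o, e, p⟩ := hd
      simp only [pass1A, List.foldl_cons, List.map_cons, List.sum_cons, addBoth]
      rw [trip_eq n o e, ih]
      congr 2
      ring

theorem length_bump (xs : List Int) (i v : Int) : (bump xs i v).length = xs.length := by
  unfold bump
  exact PySem.List.length_pySetD xs i _

theorem pyGetD_zero_nonneg (xs : List Int) (i : Int) (hxs : ∀ x ∈ xs, 0 ≤ x) :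
    0 ≤ PySem.List.pyGetD xs i 0 := by
  unfold PySem.List.pyGetD PySem.List.pyGet?
  cases h : PySem.List.pyIdx? xs.length i with
  | none => simp
  | some k =>
      simp only [Option.bind_some]
      cases h2 : xs[k]? with
      | none => simp
      | some y =>
          simp only [Option.getD_some]
          exact hxs y (List.mem_of_getElem? h2)

theorem getD_nonneg (xs : List Int) (k : Nat) (hxs : ∀ x ∈ xs, 0 ≤ x) : 0 ≤ xs.getD k 0 := by
  by_cases hk : k < xs.length
  · rw [List.getD_eq_getElem xs 0 hk]
    exact hxs _ (List.getElem_mem hk)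
  · rw [List.getD_eq_default xs 0 (by omega)]

theorem getD_set (xs : List Int) (k j : Nat) (v : Int) (hj : j < xs.length) :
    (xs.set k v).getD j 0 = if k = j then v else xs.getD j 0 := by
  by_cases hkj : k = j
  · subst hkj
    rw [List.getD_eq_getElem _ 0 (by simpa using hj)]
    simp
  · rw [List.getD_eq_getElem _ 0 (by simpa using hj), List.getD_eq_getElem xs 0 hj]
    simp [hkj]

theorem innerB_zero (nn ii : Int) (st : List (Int × Int)) (fc : Int) :
    innerB nn ii st 0 fc = (st, fc) := by
  cases st with
  | nil => rfl
  | cons p r => obtain ⟨s, t⟩ := p; simp [innerB]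

theorem bump_nonneg (xs : List Int) (i v : Int) (hxs : ∀ x ∈ xs, 0 ≤ x) (hv : 0 ≤ v) :
    ∀ x ∈ bump xs i v, 0 ≤ x := by
  intro x hx
  have hw : 0 ≤ PySem.List.pyGetD xs i 0 + v := by
    have := pyGetD_zero_nonneg xs i hxs; omega
  unfold bump PySem.List.pySetD PySem.List.pySet? at hx
  cases h : PySem.List.pyIdx? xs.length i with
  | none => rw [h] at hx; simp at hx; exact hxs x hx
  | some k =>
      rw [h] at hx
      simp only [Option.map_some, Option.getD_some] at hx
      rcases List.mem_or_eq_of_mem_set hx with h1 | h1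
      · exact hxs x h1
      · subst h1; exact hw

theorem foldl_addBoth_facts : ∀ (arr : List (Int × Int × Int)) (st : List Int × List Int),
    (∀ t ∈ arr, 0 ≤ t.2.2) → (∀ x ∈ st.1, 0 ≤ x) → (∀ x ∈ st.2, 0 ≤ x) →
    (∀ x ∈ (arr.foldl addBoth st).1, 0 ≤ x) ∧ (∀ x ∈ (arr.foldl addBoth st).2, 0 ≤ x) ∧
    (arr.foldl addBoth st).1.length = st.1.length ∧ (arr.foldl addBoth st).2.length = st.2.length := by
  intro arr
  induction arr with
  | nil => intro st _ h1 h2; exact ⟨h1, h2, rfl, rfl⟩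
  | cons hd rest ih =>
      intro st hp h1 h2
      obtain ⟨o, e, p⟩ := hd
      have hp0 : (0 : Int) ≤ p := hp (o, e, p) (by simp)
      simp only [List.foldl_cons]
      obtain ⟨a, b, c, d⟩ := ih (addBoth st (o, e, p))
        (fun t ht => hp t (by simp [ht]))
        (bump_nonneg _ _ _ h1 hp0) (bump_nonneg _ _ _ h2 hp0)
      refine ⟨a, b, ?_, ?_⟩
      · rw [c]; exact length_bump _ _ _
      · rw [d]; exact length_bump _ _ _

theorem inner_eq (nn ii : Int) : ∀ (fuel : Nat) (b : Int) (tickets : List Int)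
    (st : List (Int × Int)) (leaving fcA fcB : Int),
    (b + 1).toNat = fuel → -1 ≤ b → b ≤ ii → b < (tickets.length : Int) → 0 ≤ leaving →
    Corr tickets st → StackOK st b →
    (innerA nn ii (PySem.List.pyRange b (-1) (-1)) tickets leaving fcA).2 - fcA
      = (innerB nn ii st leaving fcB).2 - fcB ∧
    Corr (innerA nn ii (PySem.List.pyRange b (-1) (-1)) tickets leaving fcA).1
      (innerB nn ii st leaving fcB).1 ∧
    StackOK (innerB nn ii st leaving fcB).1 b ∧
    (innerA nn ii (PySem.List.pyRange b (-1) (-1)) tickets leaving fcA).1.length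
      = tickets.length := by
  intro fuel
  induction fuel with
  | zero =>
      intro b tickets st leaving fcA fcB hfuel hb1 hbi hblen hlv hcorr hok
      have hb : b = -1 := by omega
      subst hb
      have hst : st = [] := stackOK_nil st (-1) hok (by norm_num)
      subst hst
      rw [PySem.List.pyRange_neg_one_eq_nil (by norm_num)]
      simp only [innerA, innerB]
      refine ⟨by omega, hcorr, ?_, by first | rfl | trivial⟩
      simp only [StackOK]
  | succ f ihf =>
      intro b tickets st leaving fcA fcB hfuel hb1 hbi hblen hlv hcorr hok
      have hb0 : 0 ≤ b := by omega
      have hjlen : b.toNat < tickets.length := by omega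
      have hgetb : PySem.List.pyGetD tickets b 0 = lookupS st b := by
        rw [PySem.List.pyGetD_eq_getElem tickets 0 hb0 hblen]
        have h2 := hcorr b.toNat hjlen
        rw [List.getD_eq_getElem tickets 0 hjlen] at h2
        rw [h2, show ((b.toNat : Nat) : Int) = b by omega]
      have hcost : trip_cost nn b ii = trip_cost_cf nn (ii - b) := trip_eq nn b ii
      have hAstep : innerA nn ii (PySem.List.pyRange b (-1) (-1)) tickets leaving fcA
          = (if leaving - min (lookupS st b) leaving = 0 then
               (tickets.set b.toNat (lookupS st b - min (lookupS st b) leaving),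
                fcA + min (lookupS st b) leaving * trip_cost_cf nn (ii - b))
             else innerA nn ii (PySem.List.pyRange (b-1) (-1) (-1))
               (tickets.set b.toNat (lookupS st b - min (lookupS st b) leaving))
               (leaving - min (lookupS st b) leaving)
               (fcA + min (lookupS st b) leaving * trip_cost_cf nn (ii - b))) := by
        rw [PySem.List.pyRange_neg_one_cons (show (-1 : Int) < b by omega)]
        simp only [innerA, hgetb, hcost, PySem.List.pySetD_of_nonneg _ _ hb0]
      rw [hAstep]
      cases st with
      | nil =>
          have hl00 : lookupS ([] : List (Int × Int)) b = 0 := rfl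
          have hmin : min (lookupS ([] : List (Int × Int)) b) leaving = 0 := by
            rw [hl00]; omega
          have hget0 : tickets.getD b.toNat 0 = 0 := by
            have h2 := hcorr b.toNat hjlen
            rw [h2]; rfl
          have hset : tickets.set b.toNat
              (lookupS ([] : List (Int × Int)) b - min (lookupS ([] : List (Int × Int)) b) leaving)
              = tickets := by
            rw [hl00, show min (0 : Int) leaving = 0 by omega,
              show (0 : Int) - 0 = 0 by norm_num, ← hget0,
              set_getD_self tickets b.toNat hjlen]
          have hB : innerB nn ii [] leaving fcB = ([], fcB) := rfl
          rw [hB, hset, hmin]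
          simp only [zero_mul, add_zero, sub_zero]
          by_cases hl0 : leaving = 0
          · rw [if_pos hl0]
            exact ⟨by omega, hcorr, trivial, rfl⟩
          · rw [if_neg hl0]
            obtain ⟨d, c, o, l⟩ := ihf (b - 1) tickets [] leaving fcA fcB (by omega) (by omega)
              (by omega) (by omega) hlv hcorr trivial
            rw [hB] at d c o
            exact ⟨d, c, trivial, l⟩
      | cons p r =>
          obtain ⟨s, t⟩ := p
          obtain ⟨hs0, hsb, ht, hokr⟩ := hok
          by_cases hsb2 : s = b
          · subst hsb2
            have hlook : lookupS ((s, t) :: r) s = t := by simp [lookupS]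
            rw [hlook]
            by_cases hl0 : leaving = 0
            · have hmin : min t leaving = 0 := by omega
              have hget0 : tickets.getD s.toNat 0 = t := by
                have h2 := hcorr s.toNat hjlen
                rw [h2, show ((s.toNat : Nat) : Int) = s by omega, hlook]
              have hA : tickets.set s.toNat (t - min t leaving) = tickets := by
                rw [hmin, show t - 0 = t by omega, ← hget0,
                  set_getD_self tickets s.toNat hjlen]
              have hB : innerB nn ii ((s, t) :: r) leaving fcB = ((s, t) :: r, fcB) := by
                simp only [innerB, if_pos hl0]
              rw [hB, hA, hmin, if_pos (by omega)]
              exact ⟨by ring, hcorr, ⟨hs0, hsb, ht, hokr⟩, rfl⟩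
            · by_cases hwt : min t leaving < t
              · have hwl : min t leaving = leaving := by omega
                have hB : innerB nn ii ((s, t) :: r) leaving fcB
                    = ((s, t - min t leaving) :: r, fcB + min t leaving * trip_cost_cf nn (ii - s)) := by
                  simp only [innerB, if_neg hl0, if_pos hwt]
                rw [hB, if_pos (by omega)]
                refine ⟨by ring, ?_, ⟨hs0, hsb, by omega, hokr⟩, List.length_set⟩
                intro j hj
                rw [List.length_set] at hj
                rw [getD_set tickets s.toNat j _ hj]
                by_cases hj2 : s.toNat = j
                · rw [if_pos hj2, show ((j : Nat) : Int) = s by omega]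
                  simp [lookupS]
                · rw [if_neg hj2]
                  have hsj : ¬ s = (j : Int) := by omega
                  have h2 := hcorr j hj
                  simp only [lookupS, hsj, if_false] at h2 ⊢
                  exact h2
              · have hwt2 : min t leaving = t := by omega
                have hlt : t ≤ leaving := by omega
                have hB : innerB nn ii ((s, t) :: r) leaving fcB
                    = innerB nn ii r (leaving - min t leaving)
                        (fcB + min t leaving * trip_cost_cf nn (ii - s)) := by
                  simp only [innerB, if_neg hl0, if_neg hwt]
                rw [hB]
                have hcorr' : Corr (tickets.set s.toNat (t - min t leaving)) r := by
                  intro j hj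
                  rw [List.length_set] at hj
                  rw [getD_set tickets s.toNat j _ hj]
                  by_cases hj2 : s.toNat = j
                  · rw [if_pos hj2, show ((j : Nat) : Int) = s by omega, hwt2,
                      show t - t = 0 by omega]
                    exact (lookupS_eq_zero r (s - 1) s hokr (by omega)).symm
                  · rw [if_neg hj2]
                    have hsj : ¬ s = (j : Int) := by omega
                    have h2 := hcorr j hj
                    simp only [lookupS, hsj, if_false] at h2
                    exact h2
                by_cases hl2 : leaving - min t leaving = 0
                · rw [if_pos hl2, hl2, innerB_zero]
                  exact ⟨by ring, hcorr', stackOK_mono r (s - 1) s hokr (by omega),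
                    List.length_set⟩
                · rw [if_neg hl2]
                  obtain ⟨d, c, o, l⟩ := ihf (s - 1) (tickets.set s.toNat (t - min t leaving)) r
                    (leaving - min t leaving) (fcA + min t leaving * trip_cost_cf nn (ii - s))
                    (fcB + min t leaving * trip_cost_cf nn (ii - s))
                    (by omega) (by omega) (by omega) (by rw [List.length_set]; omega)
                    (by omega) hcorr' hokr
                  refine ⟨by linarith, c, stackOK_mono _ (s - 1) s o (by omega), ?_⟩
                  rw [l, List.length_set]
          · have hlook : lookupS ((s, t) :: r) b = 0 := by
              have h2 : lookupS ((s, t) :: r) b = lookupS r b := by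
                simp [lookupS, hsb2]
              rw [h2]
              exact lookupS_eq_zero r (s - 1) b hokr (by omega)
            rw [hlook]
            have hmin : min (0 : Int) leaving = 0 := by omega
            have hget0 : tickets.getD b.toNat 0 = 0 := by
              have h2 := hcorr b.toNat hjlen
              rw [h2, show ((b.toNat : Nat) : Int) = b by omega, hlook]
            have hset : tickets.set b.toNat (0 - min 0 leaving) = tickets := by
              rw [hmin, show (0 : Int) - 0 = 0 by norm_num, ← hget0,
                set_getD_self tickets b.toNat hjlen]
            rw [hset, hmin]
            simp only [zero_mul, add_zero, sub_zero]
            by_cases hl0 : leaving = 0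
            · have hB : innerB nn ii ((s, t) :: r) leaving fcB = ((s, t) :: r, fcB) := by
                simp only [innerB, if_pos hl0]
              rw [if_pos hl0, hB]
              exact ⟨by omega, hcorr, ⟨hs0, hsb, ht, hokr⟩, rfl⟩
            · rw [if_neg hl0]
              obtain ⟨d, c, o, l⟩ := ihf (b - 1) tickets ((s, t) :: r) leaving fcA fcB
                (by omega) (by omega) (by omega) (by omega) hlv hcorr
                ⟨hs0, by omega, ht, hokr⟩
              exact ⟨d, c, stackOK_mono _ (b - 1) b o (by omega), l⟩

theorem pyGetD_toNat (xs : List Int) (i : Int) (hi : 0 ≤ i) :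
    PySem.List.pyGetD xs i 0 = xs.getD i.toNat 0 := by
  conv_lhs => rw [show i = ((i.toNat : Nat) : Int) by omega]
  rw [PySem.List.pyGetD_natCast]

theorem outer_eq (nn : Int) (ent ex : List Int)
    (hent : ∀ x ∈ ent, 0 ≤ x) (hex : ∀ x ∈ ex, 0 ≤ x) :
    ∀ (fuel : Nat) (k : Int) (tickets : List Int) (st : List (Int × Int)) (fcA fcB : Int),
    0 ≤ k → nn - k = (fuel : Int) → tickets.length = nn.toNat →
    Corr tickets st → StackOK st (k - 1) →
    (outerA nn ent ex (PySem.List.pyRange k nn 1) tickets fcA).2 - fcA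
      = (outerB nn ent ex (PySem.List.pyRange k nn 1) st fcB).2 - fcB := by
  intro fuel
  induction fuel with
  | zero =>
      intro k tickets st fcA fcB hk hfuel hlen hcorr hok
      rw [PySem.List.pyRange_one_eq_nil (by omega)]
      simp only [outerA, outerB]
      omega
  | succ f ihf =>
      intro k tickets st fcA fcB hk hfuel hlen hcorr hok
      have hkn : k < nn := by omega
      rw [PySem.List.pyRange_one_cons (by omega)]
      simp only [outerA, outerB]
      have hc : PySem.List.pyGetD ent k 0 = ent.getD k.toNat 0 := pyGetD_toNat ent k hk
      have hx : PySem.List.pyGetD ex k 0 = ex.getD k.toNat 0 := pyGetD_toNat ex k hk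
      rw [hc, hx, PySem.List.pySetD_of_nonneg _ _ hk]
      have hc0 : 0 ≤ ent.getD k.toNat 0 := getD_nonneg ent k.toNat hent
      have hx0 : 0 ≤ ex.getD k.toNat 0 := getD_nonneg ex k.toNat hex
      set c := ent.getD k.toNat 0 with hcdef
      set xk := ex.getD k.toNat 0 with hxkdef
      have hklen : k.toNat < tickets.length := by omega
      have hcorr' : Corr (tickets.set k.toNat c)
          (if c ≠ 0 then (k, c) :: st else st) := by
        intro j hj
        rw [List.length_set] at hj
        rw [getD_set tickets k.toNat j _ hj]
        by_cases hj2 : k.toNat = j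
        · rw [if_pos hj2]
          by_cases hcz : c = 0
          · simp only [hcz, ne_eq, not_true_eq_false, if_false]
            rw [show ((j : Nat) : Int) = k by omega]
            exact (lookupS_eq_zero st (k - 1) k hok (by omega)).symm
          · simp only [ne_eq, hcz, not_false_eq_true, if_true, lookupS]
            rw [show ((j : Nat) : Int) = k by omega] at *
            simp
        · rw [if_neg hj2]
          have hkj : ¬ k = (j : Int) := by omega
          have h2 := hcorr j hj
          by_cases hcz : c = 0
          · simp only [hcz, ne_eq, not_true_eq_false, if_false]
            exact h2
          · simp only [ne_eq, hcz, not_false_eq_true, if_true, lookupS, hkj, if_false]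
            exact h2
      have hok' : StackOK (if c ≠ 0 then (k, c) :: st else st) k := by
        by_cases hcz : c = 0
        · simp only [hcz, ne_eq, not_true_eq_false, if_false]
          exact stackOK_mono st (k - 1) k hok (by omega)
        · simp only [ne_eq, hcz, not_false_eq_true, if_true]
          exact ⟨hk, le_refl k, by omega, hok⟩
      obtain ⟨d, c2, o, l⟩ := inner_eq nn k (k + 1).toNat k (tickets.set k.toNat c)
        (if c ≠ 0 then (k, c) :: st else st) xk fcA fcB
        rfl (by omega) (le_refl k) (by rw [List.length_set]; omega)
        hx0 hcorr' hok'
      have hrec := ihf (k + 1)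
        (innerA nn k (PySem.List.pyRange k (-1) (-1)) (tickets.set k.toNat c) xk fcA).1
        (innerB nn k (if c ≠ 0 then (k, c) :: st else st) xk fcB).1
        (innerA nn k (PySem.List.pyRange k (-1) (-1)) (tickets.set k.toNat c) xk fcA).2
        (innerB nn k (if c ≠ 0 then (k, c) :: st else st) xk fcB).2
        (by omega) (by omega) (by rw [l, List.length_set]; omega) c2
        (by rw [show k + 1 - 1 = k by omega]; exact o)
      omega

theorem replicate_nonneg (n : Nat) : ∀ x ∈ List.replicate n (0 : Int), 0 ≤ x := by
  intro x hx
  rw [List.eq_of_mem_replicate hx]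

theorem solve_eq (n : Int) (arr : List (Int × Int × Int)) (hpre : Pre_solve n arr) :
    solve n arr = solve_alt n arr := by
  unfold solve solve_alt
  rw [pass1A_split n arr _ _ 0]
  set Q := arr.foldl addBoth (List.replicate n.toNat 0, List.replicate n.toNat 0) with hQ
  set T := (arr.map (fun t => t.2.2 * trip_cost_cf n (t.2.1 - t.1))).sum with hT
  obtain ⟨hent, hex, hlent, hlex⟩ := foldl_addBoth_facts arr
    (List.replicate n.toNat 0, List.replicate n.toNat 0)
    (fun t ht => (hpre t ht).1) (replicate_nonneg n.toNat) (replicate_nonneg n.toNat)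
  rw [← hQ] at hent hex hlent hlex
  by_cases hn : n ≤ 0
  · rw [PySem.List.pyRange_one_eq_nil hn]
    show PySem.Int.mod (0 + T - 0) 1000002013 = PySem.Int.mod (T - 0) 1000002013
    rw [zero_add]
  · have hd := outer_eq n Q.1 Q.2 hent hex n.toNat 0 (List.replicate n.toNat 0) [] 0 0
      (le_refl 0) (by omega) List.length_replicate
      (by
        intro j hj
        rw [List.length_replicate] at hj
        rw [List.getD_eq_getElem _ 0 (by simpa using hj)]
        simp [lookupS])
      trivial
    have h2 : (outerA n Q.1 Q.2 (PySem.List.pyRange 0 n 1) (List.replicate n.toNat 0) 0).2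
        = (outerB n Q.1 Q.2 (PySem.List.pyRange 0 n 1) [] 0).2 := by omega
    show PySem.Int.mod
        (0 + T - (outerA n Q.1 Q.2 (PySem.List.pyRange 0 n 1) (List.replicate n.toNat 0) 0).2)
        1000002013
      = PySem.Int.mod (T - (outerB n Q.1 Q.2 (PySem.List.pyRange 0 n 1) [] 0).2) 1000002013
    rw [h2, zero_add]

-- ===== VERDICT (by name: the statement is the Claim_ definition above) =====
theorem solve_spec : Claim_equal_solve := by
  intro n arr _ hpre
  unfold Spec_solve
  exact solve_eq n arr hpre
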